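-- pv_equiv track=rewrite | github.com/xshini01/tes | app.py | split_semicolon
-- ===== SOURCE A (Python) =====
-- def split_semicolon(ocr_text):
--     lines = [line.strip() for line in ocr_text.strip().split('\n') if line.strip()]
--     segments = []
--     current = []
--
--     for line in lines:
--         if line.endswith(";"):
--             current.append(line.rstrip(";"))
--             segments.append(" ".join(current).strip())
--             current = []
--         else:
--             current.append(line)
--
--     if current:
--         segments.append(" ".join(current).strip())
--
--     return segments
-- ===== SOURCE B (Python) =====
-- def split_semicolon(ocr_text):
--     lines = [line.strip() for line in ocr_text.strip().split('\n') if line.strip()]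
--     s = ""
--     for line in lines:
--         if line.endswith(";"):
--             s += line.rstrip(";") + "\n"
--         else:
--             s += line + " "
--     segments = [p.strip() for p in s.split('\n')]
--     if not lines or lines[-1].endswith(";"):
--         segments.pop()
--     return segments
-- ===== Notes on version B (the rewrite author's own statement) =====
-- stated objective: alternative
-- what changed: A flushes a `current` buffer into `segments` inside the loop; B instead builds one marker string (a newline after each semicolon-terminated line, a space after others) and forms all segments with a single split at newlines plus one conditional pop at the end.
import Mathlib
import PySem

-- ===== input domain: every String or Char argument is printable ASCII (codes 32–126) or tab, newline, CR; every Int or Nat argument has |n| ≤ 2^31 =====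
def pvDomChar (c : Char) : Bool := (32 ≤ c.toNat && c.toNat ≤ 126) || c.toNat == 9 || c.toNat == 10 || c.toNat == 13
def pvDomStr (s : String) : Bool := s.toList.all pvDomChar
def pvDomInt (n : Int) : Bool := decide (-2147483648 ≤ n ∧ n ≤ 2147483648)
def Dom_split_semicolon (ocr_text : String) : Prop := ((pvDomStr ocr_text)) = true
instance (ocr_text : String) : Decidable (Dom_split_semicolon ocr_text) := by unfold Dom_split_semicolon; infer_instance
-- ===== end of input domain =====

-- B replaces A's in-loop flushing of a `current` buffer by building one marker string and
-- splitting it once at the end (objective: alternative decomposition, same cost).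

-- ===== PORT A =====
-- line.rstrip(";"): drop trailing ';' characters (hand port of str.rstrip with a char set; exact)
def pvRstripSemi (l : List Char) : List Char := (l.reverse.dropWhile (fun c => c == ';')).reverse

-- [line.strip() for line in ocr_text.strip().split('\n') if line.strip()]  (identical first line of both Pythons)
def pvLinesOf (ocr_text : String) : List (List Char) :=
  ((PySem.Chars.splitOn (PySem.Chars.strip ocr_text.toList) ['\n']).filter
      (fun l => !(PySem.Chars.strip l).isEmpty)).map PySem.Chars.strip

def pvStepA (st : List (List Char) × List (List Char)) (line : List Char) :
    List (List Char) × List (List Char) :=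
  if PySem.Chars.endswith line [';'] then
    (st.1 ++ [PySem.Chars.strip (PySem.Chars.join [' '] (st.2 ++ [pvRstripSemi line]))], [])
  else (st.1, st.2 ++ [line])

def split_semicolon (ocr_text : String) : List String :=
  let lines := pvLinesOf ocr_text
  let st := lines.foldl pvStepA ([], [])
  let segs := if st.2 ≠ [] then st.1 ++ [PySem.Chars.strip (PySem.Chars.join [' '] st.2)] else st.1
  segs.map String.ofList

-- ===== PORT B =====
def pvStepB (acc : List Char) (line : List Char) : List Char :=
  if PySem.Chars.endswith line [';'] then acc ++ pvRstripSemi line ++ ['\n']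
  else acc ++ line ++ [' ']

def split_semicolon_alt (ocr_text : String) : List String :=
  let lines := pvLinesOf ocr_text
  let s := lines.foldl pvStepB []
  let segs := (PySem.Chars.splitOn s ['\n']).map PySem.Chars.strip
  let segs := if lines = [] ∨ PySem.Chars.endswith (PySem.List.pyGetD lines (-1) []) [';'] then
                segs.dropLast
              else segs
  segs.map String.ofList

-- ===== PRECONDITION & SPEC =====
def Spec_split_semicolon (ocr_text : String) (out : List String) : Prop := out = split_semicolon_alt ocr_text
instance (ocr_text : String) (out : List String) : Decidable (Spec_split_semicolon ocr_text out) := by unfold Spec_split_semicolon; infer_instance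

-- ===== CLAIM (what is proved, stated in full; the proofs are below) =====
def Claim_equal_split_semicolon : Prop := ∀ (ocr_text : String), Dom_split_semicolon ocr_text → Spec_split_semicolon ocr_text (split_semicolon ocr_text)

-- ===== LEMMAS AND PROOFS =====

-- splitOn.go on separator '\n' never yields a piece containing '\n' (with enough fuel)
lemma pv_go_noNL (fuel : Nat) : ∀ (l cur : List Char) (acc : List (List Char)),
    l.length < fuel → '\n' ∉ cur → (∀ x ∈ acc, '\n' ∉ x) →
    ∀ x ∈ PySem.Chars.splitOn.go ['\n'] fuel l cur acc, '\n' ∉ x := by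
  induction fuel with
  | zero => intro l cur acc h; omega
  | succ fuel ih =>
    intro l cur acc hlen hcur hacc
    cases l with
    | nil =>
      rw [PySem.Chars.splitOn.go]
      · intro x hx
        rw [List.reverse_cons] at hx
        rcases List.mem_append.mp hx with hx | hx
        · exact hacc _ (List.mem_reverse.mp hx)
        · rw [List.mem_singleton] at hx
          subst hx
          simpa using hcur
      · omega
    | cons c rest =>
      rw [PySem.Chars.splitOn.go]
      by_cases hpre : ['\n'].isPrefixOf (c :: rest) = true
      · rw [if_pos hpre]
        refine ih _ [] (cur.reverse :: acc) (by simp at hlen ⊢; omega) (by simp) ?_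
        intro x hx
        rcases List.mem_cons.mp hx with rfl | hx
        · simpa using hcur
        · exact hacc _ hx
      · rw [if_neg hpre]
        refine ih rest (c :: cur) acc (by simp at hlen ⊢; omega) ?_ hacc
        simp [List.isPrefixOf] at hpre
        intro hx
        rcases List.mem_cons.mp hx with h | h
        · exact hpre h
        · exact hcur h

lemma pv_noNL_splitOn (s : List Char) : ∀ x ∈ PySem.Chars.splitOn s ['\n'], '\n' ∉ x := by
  unfold PySem.Chars.splitOn
  exact pv_go_noNL (s.length + 1) s [] [] (by omega) (by simp) (by simp)

lemma pv_noNL_strip (l : List Char) (h : '\n' ∉ l) : '\n' ∉ PySem.Chars.strip l := by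
  intro hc
  unfold PySem.Chars.strip PySem.Chars.rstrip PySem.Chars.lstrip at hc
  rw [List.mem_reverse] at hc
  have hc2 := (List.dropWhile_sublist _).subset hc
  rw [List.mem_reverse] at hc2
  exact h ((List.dropWhile_sublist _).subset hc2)

lemma pv_noNL_rstripSemi (l : List Char) (h : '\n' ∉ l) : '\n' ∉ pvRstripSemi l := by
  intro hc
  unfold pvRstripSemi at hc
  rw [List.mem_reverse] at hc
  have hc2 := (List.dropWhile_sublist _).subset hc
  rw [List.mem_reverse] at hc2
  exact h hc2

-- the flattened pending buffer contains no '\n' when no buffered line does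
lemma pv_noNL_pending (cs : List (List Char)) (h : ∀ c ∈ cs, '\n' ∉ c) :
    '\n' ∉ (cs.map (· ++ [' '])).flatten := by
  intro hm
  rcases List.mem_flatten.mp hm with ⟨t, ht, hmt⟩
  rcases List.mem_map.mp ht with ⟨c0, hc0, rfl⟩
  rcases List.mem_append.mp hmt with hx | hx
  · exact h c0 hc0 hx
  · simp at hx

-- go on a newline-free remainder just closes the current piece
lemma pv_go_nil (l : List Char) : ∀ (fuel : Nat) (cur : List Char) (acc : List (List Char)),
    l.length < fuel → '\n' ∉ l →
    PySem.Chars.splitOn.go ['\n'] fuel l cur acc = acc.reverse ++ [cur.reverse ++ l] := by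
  induction l with
  | nil =>
    intro fuel cur acc hlen hnl
    cases fuel with
    | zero => omega
    | succ f =>
      rw [PySem.Chars.splitOn.go]
      · simp
      · omega
  | cons c cs ih =>
    intro fuel cur acc hlen hnl
    cases fuel with
    | zero => simp at hlen
    | succ f =>
      rw [PySem.Chars.splitOn.go]
      rw [if_neg]
      · rw [ih f (c :: cur) acc (by simp at hlen ⊢; omega)
            (fun hc => hnl (List.mem_cons_of_mem _ hc))]
        simp
      · simp [List.isPrefixOf]
        intro hq
        apply hnl
        rw [← hq]
        exact List.mem_cons_self

-- go steps over one newline-free chunk up to the next '\n'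
lemma pv_go_cons (a : List Char) : ∀ (b cur : List Char) (acc : List (List Char)) (fuel : Nat),
    '\n' ∉ a → a.length + b.length + 1 < fuel →
    PySem.Chars.splitOn.go ['\n'] fuel (a ++ '\n' :: b) cur acc =
      PySem.Chars.splitOn.go ['\n'] (fuel - (a.length + 1)) b [] ((cur.reverse ++ a) :: acc) := by
  induction a with
  | nil =>
    intro b cur acc fuel hnl hlen
    cases fuel with
    | zero => omega
    | succ f =>
      rw [List.nil_append, PySem.Chars.splitOn.go, if_pos (by simp [List.isPrefixOf])]
      simp
  | cons c a' ih =>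
    intro b cur acc fuel hnl hlen
    cases fuel with
    | zero => omega
    | succ f =>
      rw [List.cons_append, PySem.Chars.splitOn.go, if_neg]
      · rw [ih b (c :: cur) acc f (fun hc => hnl (List.mem_cons_of_mem _ hc))
            (by simp at hlen ⊢; omega)]
        have hfe : f - (a'.length + 1) = f + 1 - ((c :: a').length + 1) := by
          simp only [List.length_cons]
          omega
        rw [hfe]
        simp
      · simp [List.isPrefixOf]
        intro hq
        apply hnl
        rw [← hq]
        exact List.mem_cons_self

lemma pv_go_flat (raws : List (List Char)) :
    ∀ (pending : List Char) (acc : List (List Char)) (fuel : Nat),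
    (∀ r ∈ raws, '\n' ∉ r) → '\n' ∉ pending →
    ((raws.map (· ++ ['\n'])).flatten ++ pending).length < fuel →
    PySem.Chars.splitOn.go ['\n'] fuel ((raws.map (· ++ ['\n'])).flatten ++ pending) [] acc =
      acc.reverse ++ (raws ++ [pending]) := by
  induction raws with
  | nil =>
    intro pending acc fuel hr hp hlen
    simp only [List.map_nil, List.flatten_nil, List.nil_append] at hlen ⊢
    rw [pv_go_nil pending fuel [] acc hlen hp]
    simp
  | cons r rs ih =>
    intro pending acc fuel hr hp hlen
    have hshape : (((r :: rs).map (· ++ ['\n'])).flatten : List Char) ++ pending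
        = r ++ '\n' :: ((rs.map (· ++ ['\n'])).flatten ++ pending) := by
      simp
    rw [hshape] at hlen ⊢
    rw [pv_go_cons r _ [] acc fuel (hr r (by simp)) (by simp at hlen ⊢; omega)]
    rw [ih pending _ (fuel - (r.length + 1))
        (fun x hx => hr x (by simp [hx])) hp (by simp at hlen ⊢; omega)]
    simp

lemma pv_splitOn_flat (raws : List (List Char)) (pending : List Char)
    (hr : ∀ r ∈ raws, '\n' ∉ r) (hp : '\n' ∉ pending) :
    PySem.Chars.splitOn ((raws.map (· ++ ['\n'])).flatten ++ pending) ['\n'] = raws ++ [pending] := by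
  unfold PySem.Chars.splitOn
  rw [pv_go_flat raws pending [] _ hr hp (by omega)]
  simp

lemma pv_intercalate_concat (sep r : List Char) (xs : List (List Char)) :
    List.intercalate sep (xs ++ [r]) = (xs.map (· ++ sep)).flatten ++ r := by
  induction xs with
  | nil => simp [List.intercalate]
  | cons x xs ih =>
    cases xs with
    | nil => simp [List.intercalate, List.intersperse]
    | cons y ys =>
      have hstep : List.intercalate sep ((x :: (y :: ys)) ++ [r])
          = x ++ sep ++ List.intercalate sep ((y :: ys) ++ [r]) := by
        simp [List.intercalate, List.intersperse]
      rw [hstep, ih]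
      simp

lemma pv_flatten_space (xs : List (List Char)) (h : xs ≠ []) :
    (xs.map (· ++ [' '])).flatten = List.intercalate [' '] xs ++ [' '] := by
  rcases List.eq_nil_or_concat' xs with rfl | ⟨ys, r, rfl⟩
  · exact absurd rfl h
  · rw [pv_intercalate_concat]
    simp

lemma pv_strip_append_space (x : List Char) :
    PySem.Chars.strip (x ++ [' ']) = PySem.Chars.strip x := by
  unfold PySem.Chars.strip PySem.Chars.lstrip PySem.Chars.rstrip
  rw [List.dropWhile_append]
  by_cases h : (List.dropWhile PySem.Chars.isspace x).isEmpty = true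
  · rw [if_pos h, List.isEmpty_iff.mp h]
    rw [show List.dropWhile PySem.Chars.isspace [' '] = [] from by decide]
  · rw [if_neg h]
    rw [List.reverse_append]
    have hsp : PySem.Chars.isspace ' ' = true := by decide
    simp [hsp]

-- main invariant: B's accumulated string is A's raw segments joined with '\n' plus the pending buffer
lemma pv_main (lines : List (List Char)) (hl : ∀ l ∈ lines, '\n' ∉ l) :
    ∀ (raws cur : List (List Char)), (∀ r ∈ raws, '\n' ∉ r) → (∀ c ∈ cur, '\n' ∉ c) →
    ∃ raws' : List (List Char),
      List.foldl pvStepB ((raws.map (· ++ ['\n'])).flatten ++ (cur.map (· ++ [' '])).flatten) lines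
        = (raws'.map (· ++ ['\n'])).flatten
            ++ (((List.foldl pvStepA (raws.map PySem.Chars.strip, cur) lines).2).map (· ++ [' '])).flatten
      ∧ (List.foldl pvStepA (raws.map PySem.Chars.strip, cur) lines).1 = raws'.map PySem.Chars.strip
      ∧ (∀ r ∈ raws', '\n' ∉ r)
      ∧ (∀ c ∈ (List.foldl pvStepA (raws.map PySem.Chars.strip, cur) lines).2, '\n' ∉ c) := by
  induction lines with
  | nil =>
    intro raws cur hr hc
    exact ⟨raws, by simp, by simp, hr, by simpa using hc⟩
  | cons line ls ih =>
    intro raws cur hr hc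
    have hline : '\n' ∉ line := hl line (by simp)
    have hls : ∀ l ∈ ls, '\n' ∉ l := fun l h => hl l (by simp [h])
    by_cases hend : PySem.Chars.endswith line [';'] = true
    · -- flush: the buffered lines plus the rstripped line become one raw segment
      have hrnew : '\n' ∉ (cur.map (· ++ [' '])).flatten ++ pvRstripSemi line := by
        intro hm
        rcases List.mem_append.mp hm with hm | hm
        · exact pv_noNL_pending cur hc hm
        · exact pv_noNL_rstripSemi _ hline hm
      have hjoin : PySem.Chars.join [' '] (cur ++ [pvRstripSemi line])
          = (cur.map (· ++ [' '])).flatten ++ pvRstripSemi line := by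
        unfold PySem.Chars.join
        exact pv_intercalate_concat [' '] _ cur
      have hA : pvStepA (raws.map PySem.Chars.strip, cur) line
          = ((raws ++ [(cur.map (· ++ [' '])).flatten ++ pvRstripSemi line]).map PySem.Chars.strip,
             ([] : List (List Char))) := by
        unfold pvStepA
        rw [if_pos hend, hjoin]
        simp
      have hB : pvStepB ((raws.map (· ++ ['\n'])).flatten ++ (cur.map (· ++ [' '])).flatten) line
          = (((raws ++ [(cur.map (· ++ [' '])).flatten ++ pvRstripSemi line]).map (· ++ ['\n'])).flatten
              ++ (([] : List (List Char)).map (· ++ [' '])).flatten) := by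
        unfold pvStepB
        rw [if_pos hend]
        simp
      rw [List.foldl_cons, List.foldl_cons, hA, hB]
      refine ih hls (raws ++ [(cur.map (· ++ [' '])).flatten ++ pvRstripSemi line]) [] ?_ (by simp)
      intro x hx
      rcases List.mem_append.mp hx with h | h
      · exact hr x h
      · rw [List.mem_singleton] at h
        subst h
        exact hrnew
    · have hend' : PySem.Chars.endswith line [';'] = false := by simpa using hend
      have hA : pvStepA (raws.map PySem.Chars.strip, cur) line
          = (raws.map PySem.Chars.strip, cur ++ [line]) := by
        unfold pvStepA
        rw [hend']
        simp
      have hB : pvStepB ((raws.map (· ++ ['\n'])).flatten ++ (cur.map (· ++ [' '])).flatten) line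
          = (raws.map (· ++ ['\n'])).flatten ++ ((cur ++ [line]).map (· ++ [' '])).flatten := by
        unfold pvStepB
        rw [hend']
        simp
      rw [List.foldl_cons, List.foldl_cons, hA, hB]
      refine ih hls raws (cur ++ [line]) hr ?_
      intro x hx
      rcases List.mem_append.mp hx with h | h
      · exact hc x h
      · rw [List.mem_singleton] at h
        subst h
        exact hline

-- assembling the final answers from the invariant
lemma pv_assemble (lines : List (List Char)) (hl : ∀ l ∈ lines, '\n' ∉ l) :
    (if (List.foldl pvStepA ([], []) lines).2 ≠ [] then
       (List.foldl pvStepA ([], []) lines).1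
         ++ [PySem.Chars.strip (PySem.Chars.join [' '] (List.foldl pvStepA ([], []) lines).2)]
     else (List.foldl pvStepA ([], []) lines).1)
    = (if lines = [] ∨ PySem.Chars.endswith (PySem.List.pyGetD lines (-1) []) [';'] = true then
         ((PySem.Chars.splitOn (List.foldl pvStepB [] lines) ['\n']).map PySem.Chars.strip).dropLast
       else (PySem.Chars.splitOn (List.foldl pvStepB [] lines) ['\n']).map PySem.Chars.strip) := by
  obtain ⟨raws', hB, hA1, hr', hc'⟩ := pv_main lines hl [] [] (by simp) (by simp)
  simp only [List.map_nil, List.flatten_nil, List.nil_append] at hB hA1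
  rcases List.eq_nil_or_concat' lines with rfl | ⟨init, last, rfl⟩
  · decide
  · have hget : PySem.List.pyGetD (init ++ [last]) (-1) ([] : List Char) = last :=
      PySem.List.pyGetD_neg_one_append_singleton init last []
    have hsplit : PySem.Chars.splitOn (List.foldl pvStepB [] (init ++ [last])) ['\n']
        = raws' ++ [(((List.foldl pvStepA ([], []) (init ++ [last])).2).map (· ++ [' '])).flatten] := by
      rw [hB]
      exact pv_splitOn_flat raws' _ hr' (pv_noNL_pending _ hc')
    have hcur : (List.foldl pvStepA ([], []) (init ++ [last])).2
        = if PySem.Chars.endswith last [';'] = true then []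
          else (List.foldl pvStepA ([], []) init).2 ++ [last] := by
      rw [List.foldl_append, List.foldl_cons, List.foldl_nil]
      by_cases hend : PySem.Chars.endswith last [';'] = true
      · simp [pvStepA, hend]
      · simp [pvStepA, hend]
    by_cases hend : PySem.Chars.endswith last [';'] = true
    · rw [if_neg (show ¬((List.foldl pvStepA ([], []) (init ++ [last])).2 ≠ []) from by
        rw [hcur, if_pos hend]; simp)]
      rw [if_pos (by rw [hget]; exact Or.inr hend)]
      rw [hsplit, hcur, if_pos hend]
      simp only [List.map_nil, List.flatten_nil, List.map_append, List.map_cons]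
      rw [List.dropLast_concat]
      exact hA1
    · have hcur' : (List.foldl pvStepA ([], []) (init ++ [last])).2
          = (List.foldl pvStepA ([], []) init).2 ++ [last] := by
        rw [hcur, if_neg hend]
      rw [if_pos (show (List.foldl pvStepA ([], []) (init ++ [last])).2 ≠ [] from by
        rw [hcur']; simp)]
      rw [if_neg (by rw [hget]; simp [hend])]
      rw [hsplit]
      simp only [List.map_append, List.map_cons, List.map_nil]
      rw [hA1]
      congr 1
      congr 1
      rw [pv_flatten_space _ (by rw [hcur']; simp)]
      rw [pv_strip_append_space]
      rfl

-- ===== VERDICT (by name: the statement is the Claim_ definition above) =====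
theorem split_semicolon_spec : Claim_equal_split_semicolon := by
  intro t _
  unfold Spec_split_semicolon split_semicolon split_semicolon_alt
  have hl : ∀ l ∈ pvLinesOf t, '\n' ∉ l := by
    intro l hlmem
    unfold pvLinesOf at hlmem
    rcases List.mem_map.mp hlmem with ⟨p, hp, rfl⟩
    exact pv_noNL_strip _ (pv_noNL_splitOn _ _ (List.mem_filter.mp hp).1)
  simp only []
  rw [pv_assemble (pvLinesOf t) hl]
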